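-- pv_equiv track=rewrite | github.com/kiana-moh/UWay | src/shortestPath.py | build_travel_response
-- ===== SOURCE A (Python) =====
-- from typing import Dict, List, Tuple, Optional
--
-- def extract_building(room: Optional[str]) -> str:
--     return room.split()[0] if room else "UNKNOWN"
--
-- def build_travel_response(rows: List[Dict]) -> List[Dict]:
--     buildings = [extract_building(row.get('room')) for row in rows]
--     travel: List[Dict] = []
--     for index, current in enumerate(rows):
--         previous_building = buildings[index - 1] if index > 0 else None
--         travel.append({
--             'from': previous_building,
--             'to': buildings[index],
--             'previousLocation': rows[index - 1]['room'] if index > 0 else None,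
--             'className': current.get('course_code'),
--             'fullName': current.get('course_name'),
--             'component': current.get('component'),
--             'time': current.get('time'),
--             'location': current.get('room'),
--         })
--     return travel
-- ===== SOURCE B (Python) =====
-- from typing import Dict, List, Optional
--
--
-- def extract_building(room: Optional[str]) -> str:
--     return room.split()[0] if room else "UNKNOWN"
--
--
-- KEYS = ('from', 'to', 'previousLocation', 'className', 'fullName',
--         'component', 'time', 'location')
--
--
-- def build_travel_response(rows: List[Dict]) -> List[Dict]:
--     # Columnar construction: build one list per output field (the 'from' and
--     # 'previousLocation' columns are the shifted-by-one columns, headed by None),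
--     # then transpose the columns with zip into the row dicts.
--     buildings = [extract_building(r.get('room')) for r in rows]
--     cols = (
--         [None] + buildings,                            # 'from' (extra tail element truncated by zip)
--         buildings,                                     # 'to'
--         [None] + [r['room'] for r in rows[:-1]],       # 'previousLocation'
--         [r.get('course_code') for r in rows],          # 'className'
--         [r.get('course_name') for r in rows],          # 'fullName'
--         [r.get('component') for r in rows],            # 'component'
--         [r.get('time') for r in rows],                 # 'time'
--         [r.get('room') for r in rows],                 # 'location'
--     )
--     return [dict(zip(KEYS, vals)) for vals in zip(*cols)]
-- ===== Notes on version B (the rewrite author's own statement) =====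
-- stated objective: alternative
-- what changed: Replaced A's row-at-a-time enumerate loop with index arithmetic by a columnar construction: build one list per output field (with None-headed shifted columns for 'from'/'previousLocation'), then transpose the eight columns with zip into the row dicts.
-- outside the precondition, e.g. on build_travel_response([{'room': '  '}]): A raises IndexError, B raises IndexError; on build_travel_response([{'course_code': 'CS240'}, {'room': 'MC 101'}]): A raises KeyError, B raises KeyError
import Mathlib
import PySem

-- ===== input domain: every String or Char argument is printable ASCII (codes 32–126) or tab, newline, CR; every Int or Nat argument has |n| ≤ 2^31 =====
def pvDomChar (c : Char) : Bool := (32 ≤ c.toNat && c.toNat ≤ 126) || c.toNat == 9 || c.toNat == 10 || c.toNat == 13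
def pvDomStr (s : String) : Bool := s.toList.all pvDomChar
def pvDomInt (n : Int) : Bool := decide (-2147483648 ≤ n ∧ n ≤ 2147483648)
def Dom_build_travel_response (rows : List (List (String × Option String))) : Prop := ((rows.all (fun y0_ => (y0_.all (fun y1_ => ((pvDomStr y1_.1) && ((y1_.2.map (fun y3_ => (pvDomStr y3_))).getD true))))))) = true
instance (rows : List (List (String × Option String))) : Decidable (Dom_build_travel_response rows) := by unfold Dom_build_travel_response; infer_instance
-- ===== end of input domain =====

-- B replaces A's row-at-a-time indexed loop by a columnar construction: one list per
-- output field (with shifted from/previousLocation columns) transposed by zip.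

-- row.get(k) / row[k]: first-match association lookup (some v = key present with value v, none = KeyError)
def pyGetKey (row : List (String × Option String)) (k : String) : Option (Option String) :=
  PySem.Dict.get? (PySem.Dict.mk row) k

-- extract_building: room.split()[0] if room else "UNKNOWN"; the headD default "" is only
-- reached when room is truthy but whitespace-only (Python IndexError, excluded by Pre_)
def extract_building (room : Option String) : String :=
  match room with
  | none => "UNKNOWN"
  | some s => if s = "" then "UNKNOWN" else (PySem.Str.split₀ s).headD ""

-- ===== PORT A =====
def build_travel_response (rows : List (List (String × Option String))) : List (List (String × Option String)) :=
  let buildings := rows.map (fun row => extract_building ((pyGetKey row "room").join))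
  (PySem.List.enumerate rows).foldl
    (fun travel p =>
      travel ++
        [[("from", if p.1 > 0 then PySem.List.pyGet? buildings (p.1 - 1) else none),
          ("to", PySem.List.pyGet? buildings p.1),
          -- rows[index-1]['room'] raw subscript; the .getD none is only reached on KeyError (excluded by Pre_)
          ("previousLocation",
            if p.1 > 0 then
              ((PySem.List.pyGet? rows (p.1 - 1)).bind (fun r => pyGetKey r "room")).getD none
            else none),
          ("className", (pyGetKey p.2 "course_code").join),
          ("fullName", (pyGetKey p.2 "course_name").join),
          ("component", (pyGetKey p.2 "component").join),
          ("time", (pyGetKey p.2 "time").join),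
          ("location", (pyGetKey p.2 "room").join)]])
    []

-- ===== PORT B =====
-- zip(*cols) + dict(zip(KEYS, vals)): transpose the eight columns, stopping at the
-- shortest column (Python zip truncation), pairing each value with its fixed key
def colZip : List (Option String) → List String → List (Option String) → List (Option String) →
    List (Option String) → List (Option String) → List (Option String) → List (Option String) →
    List (List (String × Option String))
  | f :: fs, t :: ts, p :: ps, c :: cs, n :: ns, m :: ms, ti :: tis, l :: ls =>
      [("from", f), ("to", some t), ("previousLocation", p), ("className", c),
       ("fullName", n), ("component", m), ("time", ti), ("location", l)]
        :: colZip fs ts ps cs ns ms tis ls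
  | _, _, _, _, _, _, _, _ => []

def build_travel_response_alt (rows : List (List (String × Option String))) : List (List (String × Option String)) :=
  let buildings := rows.map (fun r => extract_building ((pyGetKey r "room").join))
  colZip
    (none :: buildings.map some)
    buildings
    -- r['room'] raw subscript over rows[:-1]; the .getD none is only reached on KeyError (excluded by Pre_)
    (none :: rows.dropLast.map (fun r => (pyGetKey r "room").getD none))
    (rows.map (fun r => (pyGetKey r "course_code").join))
    (rows.map (fun r => (pyGetKey r "course_name").join))
    (rows.map (fun r => (pyGetKey r "component").join))
    (rows.map (fun r => (pyGetKey r "time").join))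
    (rows.map (fun r => (pyGetKey r "room").join))

-- ===== PRECONDITION & SPEC =====
-- Pre_ excludes exactly the inputs where the Python A raises: a row whose 'room' value is a
-- nonempty all-whitespace string (IndexError in extract_building), or a non-final row lacking
-- the 'room' key (KeyError on rows[index-1]['room']).
def Pre_build_travel_response (rows : List (List (String × Option String))) : Prop :=
  (rows.all (fun row =>
      ((pyGetKey row "room").join.all (fun s => s == "" || !(PySem.Str.split₀ s).isEmpty))) &&
   rows.dropLast.all (fun row => (pyGetKey row "room").isSome)) = true

instance (rows : List (List (String × Option String))) : Decidable (Pre_build_travel_response rows) := by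
  unfold Pre_build_travel_response; infer_instance

def pvWitness_build_travel_response : (List (List (String × Option String))) :=
  [[("room", some "MC 101"), ("course_code", some "CS240")], [("room", none), ("time", some "10:00")], [("room", some "DC 1351")]]

def Spec_build_travel_response (rows : List (List (String × Option String))) (out : List (List (String × Option String))) : Prop := out = build_travel_response_alt rows
instance (rows : List (List (String × Option String))) (out : List (List (String × Option String))) : Decidable (Spec_build_travel_response rows out) := by unfold Spec_build_travel_response; infer_instance

-- ===== CLAIM (what is proved, stated in full; the proofs are below) =====
def Claim_equal_build_travel_response : Prop := ∀ (rows : List (List (String × Option String))), Dom_build_travel_response rows → Pre_build_travel_response rows → Spec_build_travel_response rows (build_travel_response rows)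

-- ===== LEMMAS AND PROOFS =====

-- abbreviations for the per-row field extractors
def bldg (r : List (String × Option String)) : String := extract_building ((pyGetKey r "room").join)
def roomD (r : List (String × Option String)) : Option String := (pyGetKey r "room").getD none

-- A's loop body as a function of the full row list and an (index, row) pair
def rowOfA (full : List (List (String × Option String))) (p : Int × List (String × Option String)) :
    List (String × Option String) :=
  [("from", if p.1 > 0 then PySem.List.pyGet? (full.map bldg) (p.1 - 1) else none),
   ("to", PySem.List.pyGet? (full.map bldg) p.1),
   ("previousLocation",
     if p.1 > 0 then
       ((PySem.List.pyGet? full (p.1 - 1)).bind (fun r => pyGetKey r "room")).getD none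
     else none),
   ("className", (pyGetKey p.2 "course_code").join),
   ("fullName", (pyGetKey p.2 "course_name").join),
   ("component", (pyGetKey p.2 "component").join),
   ("time", (pyGetKey p.2 "time").join),
   ("location", (pyGetKey p.2 "room").join)]

theorem a_eq_map (rows : List (List (String × Option String))) :
    build_travel_response rows = (PySem.List.enumerate rows).map (rowOfA rows) := by
  unfold build_travel_response
  rw [PySem.List.foldl_append_singleton_eq_map]
  rfl

-- the sequential form both ports are reduced to: carry the previous row's two fields
def goRow (f0 p0 : Option String) (cur : List (String × Option String)) :
    List (String × Option String) :=
  [("from", f0), ("to", some (bldg cur)), ("previousLocation", p0),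
   ("className", (pyGetKey cur "course_code").join),
   ("fullName", (pyGetKey cur "course_name").join),
   ("component", (pyGetKey cur "component").join),
   ("time", (pyGetKey cur "time").join),
   ("location", (pyGetKey cur "room").join)]

def go2 (f0 p0 : Option String) : List (List (String × Option String)) → List (List (String × Option String))
  | [] => []
  | cur :: rest => goRow f0 p0 cur :: go2 (some (bldg cur)) (roomD cur) rest

-- B's columnar transpose equals the sequential form
theorem colZip_eq_go2 (rows : List (List (String × Option String))) :
    ∀ f0 p0 : Option String,
      colZip (f0 :: (rows.map bldg).map some) (rows.map bldg)
        (p0 :: rows.dropLast.map roomD)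
        (rows.map (fun r => (pyGetKey r "course_code").join))
        (rows.map (fun r => (pyGetKey r "course_name").join))
        (rows.map (fun r => (pyGetKey r "component").join))
        (rows.map (fun r => (pyGetKey r "time").join))
        (rows.map (fun r => (pyGetKey r "room").join))
      = go2 f0 p0 rows := by
  induction rows with
  | nil => intro f0 p0; simp [colZip, go2]
  | cons cur rest ih =>
    intro f0 p0
    cases rest with
    | nil => simp [colZip, go2, goRow]
    | cons r2 rest' =>
      simp only [List.map_cons, List.dropLast_cons₂, colZip, go2, goRow]
      exact congrArg (List.cons _) (ih _ _)

-- the sequential form as a carried-previous-row recursion (bridge to the indexed map)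
def altGo (prev : Option (List (String × Option String))) :
    List (List (String × Option String)) → List (List (String × Option String))
  | [] => []
  | cur :: rest => goRow (prev.map bldg) ((prev.map roomD).getD none) cur :: altGo (some cur) rest

theorem go2_eq_altGo (rows : List (List (String × Option String))) :
    ∀ prev : Option (List (String × Option String)),
      altGo prev rows = go2 (prev.map bldg) ((prev.map roomD).getD none) rows := by
  induction rows with
  | nil => intro prev; cases prev <;> simp [altGo, go2]
  | cons cur rest ih =>
    intro prev
    simp [altGo, go2, ih (some cur)]

theorem go_eq_map (rest : List (List (String × Option String))) :
    ∀ pre : List (List (String × Option String)),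
      altGo pre.getLast? rest = (PySem.List.enumerate rest (pre.length : Int)).map (rowOfA (pre ++ rest)) := by
  induction rest with
  | nil => intro pre; simp [altGo, PySem.List.enumerate_nil]
  | cons cur rest ih =>
    intro pre
    rw [PySem.List.enumerate_cons, List.map_cons, altGo]
    congr 1
    · -- heads agree
      rcases List.eq_nil_or_concat pre with h | ⟨pre', p, h⟩
      · subst h
        simp [goRow, rowOfA]
      · subst h
        simp only [List.getLast?_concat, List.concat_eq_append]
        have hL : (((pre' ++ [p]).length : Nat) : Int) = (pre'.length : Int) + 1 := by simp
        have hpos : ((pre'.length : Int) + 1) > 0 := by positivity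
        have e1 : (pre' ++ [p]) ++ cur :: rest = pre' ++ p :: cur :: rest := by simp
        have e3 : ((pre'.length : Int) + 1 - 1) = ((pre'.length : Nat) : Int) := by omega
        have eFrom : PySem.List.pyGet?
            ((pre' ++ p :: cur :: rest).map bldg)
            ((pre'.length : Int) + 1 - 1)
            = some (bldg p) := by
          have e4 : (pre' ++ p :: cur :: rest).map bldg
              = pre'.map bldg ++ bldg p :: (cur :: rest).map bldg := by simp
          have e5 : ((pre'.length : Int) + 1 - 1)
              = (((pre'.map bldg).length : Nat) : Int) := by simp
          rw [e4, e5, PySem.List.pyGet?_append_length]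
        have eTo : PySem.List.pyGet?
            ((pre' ++ p :: cur :: rest).map bldg)
            ((pre'.length : Int) + 1)
            = some (bldg cur) := by
          have e4 : (pre' ++ p :: cur :: rest).map bldg
              = (pre'.map bldg ++ [bldg p]) ++ bldg cur :: rest.map bldg := by simp
          have e5 : ((pre'.length : Int) + 1)
              = (((pre'.map bldg ++ [bldg p])).length : Nat) := by simp
          rw [e4, e5, PySem.List.pyGet?_append_length]
        have ePrev : PySem.List.pyGet? (pre' ++ p :: cur :: rest) ((pre'.length : Int) + 1 - 1)
            = some p := by
          rw [e3, PySem.List.pyGet?_append_length]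
        simp only [goRow, rowOfA, e1, hL, if_pos hpos, eFrom, eTo, ePrev, Option.bind_some,
          Option.map_some, Option.getD_some, bldg, roomD]
    · -- tails agree via ih at pre ++ [cur]
      have := ih (pre ++ [cur])
      simp only [List.getLast?_concat] at this
      rw [this]
      simp

theorem build_travel_response_spec : Claim_equal_build_travel_response := by
  intro rows _ _
  unfold Spec_build_travel_response
  rw [a_eq_map]
  unfold build_travel_response_alt
  have hb : rows.map (fun r => extract_building ((pyGetKey r "room").join)) = rows.map bldg := rfl
  have hp : rows.dropLast.map (fun r => (pyGetKey r "room").getD none) = rows.dropLast.map roomD := rfl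
  rw [hb, hp, colZip_eq_go2 rows none none]
  have h2 : go2 none none rows = altGo none rows := by
    simpa using (go2_eq_altGo rows none).symm
  rw [h2]
  have := go_eq_map rows []
  simp only [List.getLast?_nil, List.length_nil, Nat.cast_zero, List.nil_append] at this
  rw [this]
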